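-- pv_equiv track=rewrite | github.com/cepdnaclk/e20-4yp-onchip-offline-neuromorphic-computing | tools/calc_blame_from_inference_log.py | output_blame_rate_target_sparse
-- ===== SOURCE A (Python) =====
-- def output_blame_rate_target_sparse(
--     true_label,
--     pred_label,
--     num_output_neurons,
--     rates,
--     scale_percent,
--     invert,
--     max_abs_blame,
-- ):
--     if num_output_neurons <= 0:
--         raise ValueError("num_output_neurons must be > 0")
--     if scale_percent <= 0:
--         raise ValueError("scale_percent must be > 0")
--
--     blame = [0] * num_output_neurons
--     if true_label == pred_label:
--         return blame
--
--     sign = -1 if invert else 1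
--
--     # True channel should move toward target rate 256.
--     if 0 <= true_label < num_output_neurons:
--         delta_true = int(round((2.0 * (rates[true_label] - 256)) * (float(scale_percent) / 100.0)))
--         blame[true_label] = sign * delta_true
--
--     # Predicted channel should move toward target rate 0.
--     if 0 <= pred_label < num_output_neurons:
--         delta_pred = int(round((2.0 * (rates[pred_label] - 0)) * (float(scale_percent) / 100.0)))
--         blame[pred_label] = sign * delta_pred
--
--     if max_abs_blame > 0:
--         for idx in range(num_output_neurons):
--             if blame[idx] > max_abs_blame:
--                 blame[idx] = max_abs_blame
--             elif blame[idx] < -max_abs_blame: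
--                 blame[idx] = -max_abs_blame
--
--     return blame
-- ===== SOURCE B (Python) =====
-- def output_blame_rate_target_sparse(
--     true_label,
--     pred_label,
--     num_output_neurons,
--     rates,
--     scale_percent,
--     invert,
--     max_abs_blame,
-- ):
--     if num_output_neurons <= 0:
--         raise ValueError("num_output_neurons must be > 0")
--     if scale_percent <= 0:
--         raise ValueError("scale_percent must be > 0")
--
--     if true_label == pred_label:
--         return [0] * num_output_neurons
--
--     sign = -1 if invert else 1
--     k = float(scale_percent) / 100.0
--
--     def entry(i):
--         if i == true_label:
--             v = sign * int(round((2.0 * (rates[i] - 256)) * k))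
--         elif i == pred_label:
--             v = sign * int(round((2.0 * (rates[i] - 0)) * k))
--         else:
--             return 0
--         if max_abs_blame > 0:
--             v = max(-max_abs_blame, min(max_abs_blame, v))
--         return v
--
--     return [entry(i) for i in range(num_output_neurons)]
-- ===== Notes on version B (the rewrite author's own statement) =====
-- stated objective: alternative
-- what changed: B is purely functional and pointwise: instead of A's allocate-zero / mutate-two-slots / clamp-scan staged passes, each index decides for itself whether it is the true or predicted channel, computes and clamps its own value, and the list is built in one comprehension with no mutation.
import Mathlib
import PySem

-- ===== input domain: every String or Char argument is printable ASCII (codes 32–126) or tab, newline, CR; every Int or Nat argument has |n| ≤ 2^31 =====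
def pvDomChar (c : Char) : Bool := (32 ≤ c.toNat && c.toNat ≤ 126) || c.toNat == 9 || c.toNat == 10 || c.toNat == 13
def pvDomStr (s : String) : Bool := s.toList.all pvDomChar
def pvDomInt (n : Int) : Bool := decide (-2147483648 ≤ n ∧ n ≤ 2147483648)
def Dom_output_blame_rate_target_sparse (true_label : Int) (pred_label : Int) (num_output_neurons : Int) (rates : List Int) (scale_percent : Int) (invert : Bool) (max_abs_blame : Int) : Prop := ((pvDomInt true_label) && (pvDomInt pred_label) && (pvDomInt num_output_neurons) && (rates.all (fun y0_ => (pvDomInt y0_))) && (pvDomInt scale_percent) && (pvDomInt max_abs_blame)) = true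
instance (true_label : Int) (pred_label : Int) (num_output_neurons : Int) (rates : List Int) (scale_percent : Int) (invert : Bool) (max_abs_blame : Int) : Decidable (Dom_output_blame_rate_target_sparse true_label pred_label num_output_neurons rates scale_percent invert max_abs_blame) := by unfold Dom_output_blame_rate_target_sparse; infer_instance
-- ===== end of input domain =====

-- B builds the blame vector purely and pointwise (one comprehension, each index computes and
-- clamps its own value) instead of A's allocate / mutate-two-slots / clamp-scan passes;
-- objective: alternative (same O(n) cost).
-- Shared exact model of the Python float arithmetic (IEEE-754 double, round-half-even),
-- exact on the stated |int| ≤ 2^31 domain (checked against CPython):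
-- round half to even of a rational (Python's round(), and IEEE tie-breaking)
def pvRHE (x : ℚ) : Int :=
  let n := ⌊x⌋
  let f := x - (n : ℚ)
  if f < 1/2 then n else if (1/2 : ℚ) < f then n + 1 else if n % 2 = 0 then n else n + 1

-- floor of log2 of a positive rational
def pvILog2 (q : ℚ) : Int :=
  let p : Int := Nat.log2 q.num.toNat
  let r : Int := Nat.log2 q.den
  if (2 : ℚ) ^ (p - r) ≤ q then p - r else p - r - 1

-- nearest IEEE-754 double to a rational (normal range; exact for the magnitudes reachable here)
def pvRoundDouble (q : ℚ) : ℚ :=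
  if q = 0 then 0 else
    let m := |q|
    let sh := pvILog2 m - 52
    let n := pvRHE (m * (2 : ℚ) ^ (-sh))
    (if q < 0 then (-1 : ℚ) else 1) * (n : ℚ) * (2 : ℚ) ^ sh

-- int(round((2.0 * x) * (float(s) / 100.0)))  for Python ints x, s (s > 0)
def pvDelta (x : Int) (s : Int) : Int :=
  pvRHE (pvRoundDouble ((2 * (x : ℚ)) * pvRoundDouble ((s : ℚ) / 100)))

-- ===== PORT A =====
def output_blame_rate_target_sparse (true_label : Int) (pred_label : Int) (num_output_neurons : Int) (rates : List Int) (scale_percent : Int) (invert : Bool) (max_abs_blame : Int) : List Int :=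
  let blame := List.replicate num_output_neurons.toNat 0
  if true_label = pred_label then blame
  else
    let sign : Int := if invert then -1 else 1
    let blame :=
      if 0 ≤ true_label ∧ true_label < num_output_neurons then
        blame.set true_label.toNat
          (sign * pvDelta (PySem.List.pyGetD rates true_label 0 - 256) scale_percent)
      else blame
    let blame :=
      if 0 ≤ pred_label ∧ pred_label < num_output_neurons then
        blame.set pred_label.toNat
          (sign * pvDelta (PySem.List.pyGetD rates pred_label 0 - 0) scale_percent)
      else blame
    if 0 < max_abs_blame then
      (List.range num_output_neurons.toNat).foldl
        (fun b idx =>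
          if max_abs_blame < b.getD idx 0 then b.set idx max_abs_blame
          else if b.getD idx 0 < -max_abs_blame then b.set idx (-max_abs_blame)
          else b)
        blame
    else blame

-- ===== PORT B =====
def output_blame_rate_target_sparse_alt (true_label : Int) (pred_label : Int) (num_output_neurons : Int) (rates : List Int) (scale_percent : Int) (invert : Bool) (max_abs_blame : Int) : List Int :=
  if true_label = pred_label then List.replicate num_output_neurons.toNat 0
  else
    let sign : Int := if invert then -1 else 1
    (PySem.List.pyRange 0 num_output_neurons 1).map (fun i =>
      if i = true_label then
        let v := sign * pvDelta (PySem.List.pyGetD rates i 0 - 256) scale_percent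
        if 0 < max_abs_blame then max (-max_abs_blame) (min max_abs_blame v) else v
      else if i = pred_label then
        let v := sign * pvDelta (PySem.List.pyGetD rates i 0 - 0) scale_percent
        if 0 < max_abs_blame then max (-max_abs_blame) (min max_abs_blame v) else v
      else 0)

-- ===== PRECONDITION & SPEC =====
-- Pre_ excludes exactly the inputs where Python A raises: ValueError when
-- num_output_neurons ≤ 0 or scale_percent ≤ 0, and IndexError when a guarded label
-- is a valid neuron index but out of range for `rates`.
def Pre_output_blame_rate_target_sparse (true_label : Int) (pred_label : Int) (num_output_neurons : Int) (rates : List Int) (scale_percent : Int) (invert : Bool) (max_abs_blame : Int) : Prop :=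
  0 < num_output_neurons ∧ 0 < scale_percent ∧
  (true_label ≠ pred_label →
    ((0 ≤ true_label ∧ true_label < num_output_neurons) → true_label < (rates.length : Int)) ∧
    ((0 ≤ pred_label ∧ pred_label < num_output_neurons) → pred_label < (rates.length : Int)))
instance (true_label : Int) (pred_label : Int) (num_output_neurons : Int) (rates : List Int) (scale_percent : Int) (invert : Bool) (max_abs_blame : Int) : Decidable (Pre_output_blame_rate_target_sparse true_label pred_label num_output_neurons rates scale_percent invert max_abs_blame) := by unfold Pre_output_blame_rate_target_sparse; infer_instance

def pvWitness_output_blame_rate_target_sparse : Int × Int × Int × List Int × Int × Bool × Int := (0, 1, 2, [300, 100], 50, false, 10)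

def Spec_output_blame_rate_target_sparse (true_label : Int) (pred_label : Int) (num_output_neurons : Int) (rates : List Int) (scale_percent : Int) (invert : Bool) (max_abs_blame : Int) (out : List Int) : Prop := out = output_blame_rate_target_sparse_alt true_label pred_label num_output_neurons rates scale_percent invert max_abs_blame
instance (true_label : Int) (pred_label : Int) (num_output_neurons : Int) (rates : List Int) (scale_percent : Int) (invert : Bool) (max_abs_blame : Int) (out : List Int) : Decidable (Spec_output_blame_rate_target_sparse true_label pred_label num_output_neurons rates scale_percent invert max_abs_blame out) := by unfold Spec_output_blame_rate_target_sparse; infer_instance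

-- ===== CLAIM (what is proved, stated in full; the proofs are below) =====
def Claim_equal_output_blame_rate_target_sparse : Prop := ∀ (true_label : Int) (pred_label : Int) (num_output_neurons : Int) (rates : List Int) (scale_percent : Int) (invert : Bool) (max_abs_blame : Int), Dom_output_blame_rate_target_sparse true_label pred_label num_output_neurons rates scale_percent invert max_abs_blame → Pre_output_blame_rate_target_sparse true_label pred_label num_output_neurons rates scale_percent invert max_abs_blame → Spec_output_blame_rate_target_sparse true_label pred_label num_output_neurons rates scale_percent invert max_abs_blame (output_blame_rate_target_sparse true_label pred_label num_output_neurons rates scale_percent invert max_abs_blame)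

-- ===== LEMMAS AND PROOFS =====

-- pointwise form of A's clamp step
def pvCl (m v : Int) : Int := if m < v then m else if v < -m then -m else v

theorem pvCl_max_min (m v : Int) (hm : 0 < m) : pvCl m v = max (-m) (min m v) := by
  simp only [pvCl]; omega

theorem pvCl_zero (m : Int) (hm : 0 < m) : pvCl m 0 = 0 := by
  simp only [pvCl]; omega

theorem foldl_clamp_range' (m : Int) :
    ∀ (l2 l1 : List Int),
    (List.range' l1.length l2.length).foldl
        (fun b idx =>
          if m < b.getD idx 0 then b.set idx m
          else if b.getD idx 0 < -m then b.set idx (-m)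
          else b)
        (l1 ++ l2)
      = l1 ++ l2.map (pvCl m) := by
  intro l2
  induction l2 with
  | nil => simp
  | cons x t ih =>
    intro l1
    rw [List.length_cons, List.range'_succ, List.foldl_cons]
    have hget : (l1 ++ x :: t).getD l1.length 0 = x := by
      rw [List.getD_append_right _ _ _ _ (le_refl _)]
      simp
    have hset : ∀ a : Int, (l1 ++ x :: t).set l1.length a = (l1 ++ [a]) ++ t := by
      intro a
      rw [List.set_append_right _ _ (le_refl _)]
      simp
    have hlen : l1.length + 1 = (l1 ++ [pvCl m x]).length := by simp
    have hfin : ∀ a : Int, a = pvCl m x →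
        List.foldl
          (fun b idx =>
            if m < b.getD idx 0 then b.set idx m
            else if b.getD idx 0 < -m then b.set idx (-m)
            else b)
          ((l1 ++ [a]) ++ t) (List.range' (l1.length + 1) t.length)
        = l1 ++ (x :: t).map (pvCl m) := by
      intro a ha
      rw [ha, hlen, ih (l1 ++ [pvCl m x])]
      simp
    rw [hget]
    by_cases h1 : m < x
    · rw [if_pos h1, hset]
      exact hfin m (by simp [pvCl, h1])
    · rw [if_neg h1]
      by_cases h2 : x < -m
      · rw [if_pos h2, hset]
        exact hfin (-m) (by simp [pvCl, h1, h2])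
      · rw [if_neg h2]
        have : l1 ++ x :: t = (l1 ++ [x]) ++ t := by simp
        rw [this]
        exact hfin x (by simp [pvCl, h1, h2])

theorem foldl_clamp_eq_map (m : Int) (b : List Int) :
    (List.range b.length).foldl
        (fun b idx =>
          if m < b.getD idx 0 then b.set idx m
          else if b.getD idx 0 < -m then b.set idx (-m)
          else b)
        b
      = b.map (pvCl m) := by
  have := foldl_clamp_range' m b []
  simpa [List.range_eq_range'] using this

-- the staged (set/set) list of A, read pointwise, is B's per-index value before clamping
theorem staged_getElem (tl pl n : Int) (dT dP : Int) (hne : tl ≠ pl) (i : Nat) (hi : i < n.toNat) :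
    ((if 0 ≤ pl ∧ pl < n then
        (if 0 ≤ tl ∧ tl < n then (List.replicate n.toNat (0:Int)).set tl.toNat dT
         else List.replicate n.toNat 0).set pl.toNat dP
      else
        (if 0 ≤ tl ∧ tl < n then (List.replicate n.toNat (0:Int)).set tl.toNat dT
         else List.replicate n.toNat 0))[i]'(by split_ifs <;> simp <;> omega) )
    = (if (i : Int) = tl then dT else if (i : Int) = pl then dP else 0) := by
  split_ifs <;> simp only [List.getElem_set, List.getElem_replicate] <;>
    split_ifs <;> first | rfl | (exfalso; omega)

-- ===== VERDICT (by name: the statement is the Claim_ definition above) =====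
theorem output_blame_rate_target_sparse_spec : Claim_equal_output_blame_rate_target_sparse := by
  intro tl pl n rates s inv m _ _
  unfold Spec_output_blame_rate_target_sparse
  unfold output_blame_rate_target_sparse output_blame_rate_target_sparse_alt
  by_cases heq : tl = pl
  · simp [heq]
  · simp only [if_neg heq]
    set sign : Int := if inv then -1 else 1 with hsign
    set dT : Int := sign * pvDelta (PySem.List.pyGetD rates tl 0 - 256) s with hdT
    set dP : Int := sign * pvDelta (PySem.List.pyGetD rates pl 0 - 0) s with hdP
    set staged : List Int :=
      (if 0 ≤ pl ∧ pl < n then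
        (if 0 ≤ tl ∧ tl < n then (List.replicate n.toNat (0:Int)).set tl.toNat dT
         else List.replicate n.toNat 0).set pl.toNat dP
      else
        (if 0 ≤ tl ∧ tl < n then (List.replicate n.toNat (0:Int)).set tl.toNat dT
         else List.replicate n.toNat 0)) with hstaged
    have hlen : staged.length = n.toNat := by
      rw [hstaged]; split_ifs <;> simp
    have hkey : ∀ (i : Nat) (hi : i < n.toNat),
        staged[i]'(by omega) = (if (i : Int) = tl then dT else if (i : Int) = pl then dP else 0) := by
      intro i hi
      exact staged_getElem tl pl n dT dP heq i hi
    by_cases hm : 0 < m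
    · simp only [if_pos hm]
      have hA : (List.range n.toNat).foldl
          (fun b idx =>
            if m < b.getD idx 0 then b.set idx m
            else if b.getD idx 0 < -m then b.set idx (-m)
            else b) staged = staged.map (pvCl m) := by
        rw [← hlen, foldl_clamp_eq_map]
      rw [hA]
      apply List.ext_getElem
      · simp [hlen, PySem.List.length_pyRange_one]
      · intro i h1 h2
        have hi : i < n.toNat := by simpa [hlen] using h1
        simp only [List.getElem_map, PySem.List.getElem_pyRange_one, zero_add]
        rw [hkey i hi]
        split_ifs with hT hP
        · rw [hT, pvCl_max_min m _ hm, hdT]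
        · rw [hP, pvCl_max_min m _ hm, hdP]
        · exact pvCl_zero m hm
    · simp only [if_neg hm]
      apply List.ext_getElem
      · simp [hlen, PySem.List.length_pyRange_one]
      · intro i h1 h2
        have hi : i < n.toNat := by simpa [hlen] using h1
        simp only [List.getElem_map, PySem.List.getElem_pyRange_one, zero_add]
        rw [hkey i hi]
        split_ifs with hT hP
        · rw [hT, hdT]
        · rw [hP, hdP]
        · rfl
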